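-- pv_equiv track=rewrite | github.com/rhkddud3917/Algorithm-Practice | Programmers/level2/프로그래머스-level2-쇠막대기.py | solution
-- ===== SOURCE A (Python) =====
-- def solution(arrangement):
--     answer = 0
--     arr = list(arrangement)
--     count = 0
--
--     while True:
--         x = arr.pop(0)
--         if x == ')':
--             answer += 1
--             count -= 1
--         if len(arr) == 0:
--             break
--         y = arr[0]
--         if x == '(' and y == '(':
--             count += 1
--         if x == '(' and y == ')':
--             answer += count
--             del arr[0]
--
--     return answer
-- ===== SOURCE B (Python) =====
-- def solution(arrangement):
--     answer = 0
--     count = 0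
--     i = 0
--     n = len(arrangement)
--     while i < n:
--         c = arrangement[i]
--         if c == '(':
--             if i + 1 < n and arrangement[i + 1] == ')':
--                 answer += count
--                 i += 2
--                 continue
--             if i + 1 < n and arrangement[i + 1] == '(':
--                 count += 1
--             i += 1
--         elif c == ')':
--             answer += 1
--             count -= 1
--             i += 1
--         else:
--             i += 1
--     return answer
-- ===== Notes on version B (the rewrite author's own statement) =====
-- stated objective: faster
-- what changed: B replaces A's destructive O(n^2) front-popping list loop (arr.pop(0)/del arr[0]) with a single O(n) index scan over the string that looks one character ahead, so the list is never rebuilt.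
-- crash fix: A raises IndexError on the empty string and on any string ending in '()' (the final laser deletes the last element and the next pop(0) hits an empty list); B returns the piece count there (0 for '()'). — e.g. on solution("()"): A raises IndexError, B returns 0
import Mathlib
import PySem

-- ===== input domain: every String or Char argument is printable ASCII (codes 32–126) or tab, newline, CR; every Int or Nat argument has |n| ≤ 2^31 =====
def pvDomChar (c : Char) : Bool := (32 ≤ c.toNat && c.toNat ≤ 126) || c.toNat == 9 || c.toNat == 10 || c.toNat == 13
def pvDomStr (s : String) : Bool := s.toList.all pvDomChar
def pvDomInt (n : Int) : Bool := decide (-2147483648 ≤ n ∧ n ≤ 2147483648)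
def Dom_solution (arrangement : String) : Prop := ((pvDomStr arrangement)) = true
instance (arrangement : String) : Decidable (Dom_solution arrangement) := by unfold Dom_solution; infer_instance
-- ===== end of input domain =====

-- B replaces A's destructive front-popping list loop with a single index scan with one-char lookahead.

-- ===== PORT A =====
-- A's while-True loop: pop x from the front, handle ')', break if arr is empty, look at y = arr[0],
-- possibly bump count, or on a laser "()" add count and delete the ')'.  `none` is exactly the
-- IndexError of arr.pop(0) on an empty arr.
def aGo : List Char → Int → Int → Option Int
  | [], _, _ => none            -- x = arr.pop(0) raises IndexError
  | x :: arr', answer, count =>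
      let answer := if x = ')' then answer + 1 else answer
      let count  := if x = ')' then count - 1 else count
      match arr' with
      | [] => some answer       -- len(arr) == 0: break
      | y :: arr'' =>
          if x = '(' ∧ y = '(' then aGo (y :: arr'') answer (count + 1)
          else if x = '(' ∧ y = ')' then aGo arr'' (answer + count) count   -- laser: del arr[0]
          else aGo (y :: arr'') answer count

-- Pre_solution excludes exactly the inputs where aGo is none (A raises); .getD 0 is never used there.
def solution (arrangement : String) : Int :=
  (aGo arrangement.toList 0 0).getD 0

-- ===== PORT B =====
-- B's single index scan, rendered as structural recursion on the character list with the same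
-- one-character lookahead that B's `arrangement[i + 1]` performs (last char = no lookahead).
def altGo : List Char → Int → Int
  | [], _ => 0
  | [c], _ => if c = ')' then 1 else 0
  | c :: y :: rest, count =>
      if c = '(' then
        if y = ')' then count + altGo rest count          -- laser "()": i += 2
        else if y = '(' then altGo (y :: rest) (count + 1)
        else altGo (y :: rest) count
      else if c = ')' then 1 + altGo (y :: rest) (count - 1)
      else altGo (y :: rest) count

def solution_alt (arrangement : String) : Int :=
  altGo arrangement.toList 0

-- ===== PRECONDITION & SPEC =====
-- true iff the last two characters are '(' ')'
def endsLaser : List Char → Bool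
  | [] => false
  | [_] => false
  | [a, b] => a = '(' && b = ')'
  | _ :: b :: c :: t => endsLaser (b :: c :: t)

-- A raises IndexError on the empty string and whenever the string ends in "()": the scan always
-- reaches the final '(', fires the laser branch, deletes the closing ')' and then pops an empty list.
def Pre_solution (arrangement : String) : Prop :=
  arrangement.toList ≠ [] ∧ endsLaser arrangement.toList = false

instance (arrangement : String) : Decidable (Pre_solution arrangement) := by
  unfold Pre_solution; infer_instance

def pvWitness_solution : String := "(())"

-- A raises IndexError on the empty string and on any string ending in "()"; B returns the piece count there.
def Raises_solution (arrangement : String) : Prop :=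
  arrangement.toList = [] ∨ endsLaser arrangement.toList = true

instance (arrangement : String) : Decidable (Raises_solution arrangement) := by
  unfold Raises_solution; infer_instance

def pvRaiseWitness_solution : String := "()"
def pvRaiseWitnessOut_solution : Int := 0

def Spec_solution (arrangement : String) (out : Int) : Prop := out = solution_alt arrangement
instance (arrangement : String) (out : Int) : Decidable (Spec_solution arrangement out) := by
  unfold Spec_solution; infer_instance

-- ===== CLAIM (what is proved, stated in full; the proofs are below) =====
def Claim_equal_solution : Prop := ∀ (arrangement : String), Dom_solution arrangement → Pre_solution arrangement → Spec_solution arrangement (solution arrangement)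
def Claim_raises_solution : Prop := (∀ (arrangement : String), Dom_solution arrangement → Raises_solution arrangement → ¬ Pre_solution arrangement) ∧ (Dom_solution (pvRaiseWitness_solution) ∧ Raises_solution (pvRaiseWitness_solution) ∧ solution_alt (pvRaiseWitness_solution) = pvRaiseWitnessOut_solution)

-- ===== LEMMAS AND PROOFS =====

theorem endsLaser_cons (a : Char) (l : List Char) (h : 2 ≤ l.length) :
    endsLaser (a :: l) = endsLaser l := by
  match l with
  | b :: c :: t => rfl
  | [] | [_] => simp at h

-- false propagates to the tail (a one-element tail is never a laser end)
theorem endsLaser_tail (a : Char) (l : List Char) (h : endsLaser (a :: l) = false) :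
    endsLaser l = false := by
  match l with
  | [] => rfl
  | [_] => rfl
  | b :: c :: t => rwa [endsLaser_cons a _ (by simp)] at h

-- Core invariant: on a nonempty list not ending in "()", A's loop returns answer + (B's scan with count).
theorem aGo_eq_altGo : ∀ (n : Nat) (l : List Char), l.length ≤ n → l ≠ [] →
    endsLaser l = false → ∀ (answer count : Int),
    aGo l answer count = some (answer + altGo l count) := by
  intro n
  induction n with
  | zero =>
      intro l hl hne
      cases l with
      | nil => exact absurd rfl hne
      | cons a t => simp at hl
  | succ n ih =>
      intro l hl hne hend answer count
      match l with
      | [x] =>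
          simp only [aGo, altGo]
          by_cases hx : x = ')' <;> simp [hx]
      | x :: y :: rest =>
          have hl' : (y :: rest).length ≤ n := by simpa using hl
          have hend' : endsLaser (y :: rest) = false := endsLaser_tail _ _ hend
          by_cases hx : x = '('
          · subst hx
            by_cases hy : y = ')'
            · subst hy
              match rest with
              | [] => exact absurd hend (by decide)
              | c :: t =>
                  have hb : (c :: t).length ≤ n := by simp at hl' ⊢; omega
                  have hendr : endsLaser (c :: t) = false := endsLaser_tail _ _ hend'
                  simp [aGo, altGo, ih (c :: t) hb (by simp) hendr, add_assoc]
            · by_cases hy2 : y = '('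
              · subst hy2
                simp [aGo, altGo, ih ('(' :: rest) hl' (by simp) hend']
              · simp [aGo, altGo, hy, hy2, ih (y :: rest) hl' (by simp) hend']
          · by_cases hx2 : x = ')'
            · subst hx2
              simp [aGo, altGo, ih (y :: rest) hl' (by simp) hend']
              ring_nf
            · simp [aGo, altGo, hx, hx2, ih (y :: rest) hl' (by simp) hend']

-- ===== VERDICT (by name: the statement is the Claim_ definition above) =====
theorem solution_spec : Claim_equal_solution := by
  intro s _ hpre
  obtain ⟨h1, h2⟩ := hpre
  unfold Spec_solution solution solution_alt
  rw [aGo_eq_altGo s.toList.length s.toList le_rfl h1 h2]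
  simp

@[simp] theorem solution_raises : Claim_raises_solution := by
  unfold Claim_raises_solution
  refine ⟨?_, by decide⟩
  intro s _ hr hpre
  rcases hr with h | h
  · exact hpre.1 h
  · rw [hpre.2] at h; exact Bool.false_ne_true h
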